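-- pv_equiv track=rewrite | github.com/Albert-Bas2002/ML-Models-Demo | Neural_Net_cv2.py | split_list_by_y_difference
-- ===== SOURCE A (Python) =====
-- def split_list_by_y_difference(data, max_y_diff=60):
--     sorted_data = sorted(data, key=lambda item: item[1])
--     result = []
--     current_group = []
--
--     if sorted_data:
--         current_group.append(sorted_data[0])
--
--     for i in range(1, len(sorted_data)):
--         y1 = sorted_data[i - 1][1]
--         y2 = sorted_data[i][1]
--
--         if abs(y2 - y1) > max_y_diff:
--             result.append(current_group)
--             current_group = []
--
--         current_group.append(sorted_data[i])
--
--     if current_group: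
--         result.append(current_group)
--
--     return result
-- ===== SOURCE B (Python) =====
-- def split_list_by_y_difference(data, max_y_diff=60):
--     s = sorted(data, key=lambda item: item[1])
--     if not s:
--         return []
--     cuts = [i for i in range(1, len(s)) if abs(s[i][1] - s[i - 1][1]) > max_y_diff]
--     bounds = [0] + cuts + [len(s)]
--     return [s[a:b] for a, b in zip(bounds, bounds[1:])]
-- ===== Notes on version B (the rewrite author's own statement) =====
-- stated objective: alternative
-- what changed: Instead of growing a current group inside the loop, B first collects the cut indices (where the adjacent y-gap exceeds max_y_diff) in one pass and then produces the groups as slices between consecutive boundaries.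
import Mathlib
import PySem

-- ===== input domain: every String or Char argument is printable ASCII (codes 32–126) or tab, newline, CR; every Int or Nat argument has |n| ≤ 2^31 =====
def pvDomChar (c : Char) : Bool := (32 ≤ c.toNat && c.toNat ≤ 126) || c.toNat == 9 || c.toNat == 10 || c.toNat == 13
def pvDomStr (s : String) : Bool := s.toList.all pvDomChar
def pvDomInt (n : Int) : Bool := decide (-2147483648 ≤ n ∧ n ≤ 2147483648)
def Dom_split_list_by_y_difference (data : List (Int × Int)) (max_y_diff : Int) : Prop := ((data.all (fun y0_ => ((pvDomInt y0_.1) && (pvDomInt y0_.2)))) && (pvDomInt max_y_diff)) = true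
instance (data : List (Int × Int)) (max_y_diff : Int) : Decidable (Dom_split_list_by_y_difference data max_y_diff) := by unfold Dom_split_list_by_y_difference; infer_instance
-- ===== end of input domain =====

-- B computes the cut indices first and then slices the sorted list between consecutive
-- boundaries, instead of growing a current group element by element (objective: alternative).

-- ===== PORT A =====
def split_list_by_y_difference (data : List (Int × Int)) (max_y_diff : Int) : List (List (Int × Int)) :=
  let s := PySem.List.sorted data (fun item => item.2) false
  let cg0 : List (Int × Int) := if s.isEmpty then [] else [PySem.List.pyGetD s 0 (0, 0)]
  let st := (PySem.List.pyRange 1 (s.length : Int) 1).foldl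
      (fun (st : List (List (Int × Int)) × List (Int × Int)) i =>
        let y1 := (PySem.List.pyGetD s (i - 1) (0, 0)).2
        let y2 := (PySem.List.pyGetD s i (0, 0)).2
        if |y2 - y1| > max_y_diff then
          (st.1 ++ [st.2], [PySem.List.pyGetD s i (0, 0)])
        else
          (st.1, st.2 ++ [PySem.List.pyGetD s i (0, 0)]))
      ([], cg0)
  if st.2.isEmpty then st.1 else st.1 ++ [st.2]

-- ===== PORT B =====
def split_list_by_y_difference_alt (data : List (Int × Int)) (max_y_diff : Int) : List (List (Int × Int)) :=
  let s := PySem.List.sorted data (fun item => item.2) false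
  if s.isEmpty then [] else
    let cuts := (PySem.List.pyRange 1 (s.length : Int) 1).filter
        (fun i => decide (|(PySem.List.pyGetD s i (0, 0)).2 - (PySem.List.pyGetD s (i - 1) (0, 0)).2| > max_y_diff))
    let bounds : List Int := 0 :: cuts ++ [(s.length : Int)]
    (bounds.zip (PySem.List.slice bounds (some 1) none)).map
      (fun ab => PySem.List.slice s (some ab.1) (some ab.2))

-- ===== PRECONDITION & SPEC =====
def Spec_split_list_by_y_difference (data : List (Int × Int)) (max_y_diff : Int) (out : List (List (Int × Int))) : Prop := out = split_list_by_y_difference_alt data max_y_diff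
instance (data : List (Int × Int)) (max_y_diff : Int) (out : List (List (Int × Int))) : Decidable (Spec_split_list_by_y_difference data max_y_diff out) := by unfold Spec_split_list_by_y_difference; infer_instance

-- ===== CLAIM (what is proved, stated in full; the proofs are below) =====
def Claim_equal_split_list_by_y_difference : Prop := ∀ (data : List (Int × Int)) (max_y_diff : Int), Dom_split_list_by_y_difference data max_y_diff → Spec_split_list_by_y_difference data max_y_diff (split_list_by_y_difference data max_y_diff)

-- ===== LEMMAS AND PROOFS =====

-- 'result' finalisation of A's loop: append the current group if it is nonempty
def finishP (p : List (List (Int × Int)) × List (Int × Int)) : List (List (Int × Int)) :=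
  if p.2.isEmpty then p.1 else p.1 ++ [p.2]

theorem drop_take_one (s : List (Int × Int)) (k : Nat) (hk : k < s.length) (z : Int × Int) :
    (s.drop k).take 1 = [s.getD k z] := by
  rw [List.drop_eq_getElem_cons hk, List.getD_eq_getElem?_getD, List.getElem?_eq_getElem hk]
  rfl

theorem take_push (s : List (Int × Int)) (j k : Nat) (hj : j ≤ k) (hk : k < s.length) (z : Int × Int) :
    (s.drop j).take (k - j) ++ [s.getD k z] = (s.drop j).take (k + 1 - j) := by
  have h1 : k + 1 - j = (k - j) + 1 := by omega
  rw [h1, List.take_add_one]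
  have h2 : (s.drop j)[k - j]? = some (s.getD k z) := by
    rw [List.getElem?_drop]
    have h3 : j + (k - j) = k := by omega
    rw [h3, List.getElem?_eq_getElem hk, List.getD_eq_getElem?_getD, List.getElem?_eq_getElem hk]
    rfl
  rw [h2]
  rfl

theorem take_nonempty (s : List (Int × Int)) (j : Nat) (hj : j < s.length) :
    ((s.drop j).take (s.length - j)).isEmpty = false := by
  have h : ((s.drop j).take (s.length - j)).length = s.length - j := by
    simp [List.length_take, List.length_drop]
  rw [List.isEmpty_eq_false_iff, ← List.length_pos_iff, h]
  omega

-- loop invariant: from index k on, with the current group being the slice s[j:k],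
-- A's loop (finalised) produces the groups cut at the gap indices ≥ k
theorem inv_lemma (s : List (Int × Int)) (m : Int) (d : Nat) :
    ∀ (k j : Nat) (res : List (List (Int × Int))), 1 ≤ k → j < k → k + d = s.length →
    finishP ((PySem.List.pyRange (k : Int) (s.length : Int) 1).foldl
        (fun (st : List (List (Int × Int)) × List (Int × Int)) i =>
          let y1 := (PySem.List.pyGetD s (i - 1) (0, 0)).2
          let y2 := (PySem.List.pyGetD s i (0, 0)).2
          if |y2 - y1| > m then
            (st.1 ++ [st.2], [PySem.List.pyGetD s i (0, 0)])
          else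
            (st.1, st.2 ++ [PySem.List.pyGetD s i (0, 0)]))
        (res, (s.drop j).take (k - j)))
    = res ++
      ((((j : Int) :: (PySem.List.pyRange (k : Int) (s.length : Int) 1).filter
          (fun i => decide (|(PySem.List.pyGetD s i (0, 0)).2 - (PySem.List.pyGetD s (i - 1) (0, 0)).2| > m))
          ++ [(s.length : Int)]).zip
        ((PySem.List.pyRange (k : Int) (s.length : Int) 1).filter
          (fun i => decide (|(PySem.List.pyGetD s i (0, 0)).2 - (PySem.List.pyGetD s (i - 1) (0, 0)).2| > m))
          ++ [(s.length : Int)])).map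
        (fun ab => PySem.List.slice s (some ab.1) (some ab.2))) := by
  induction d with
  | zero =>
    intro k j res hk hj hkd
    obtain rfl : k = s.length := by omega
    rw [PySem.List.pyRange_one_eq_nil (le_refl _)]
    simp only [List.foldl_nil, List.filter_nil, List.nil_append, finishP]
    rw [take_nonempty s j hj]
    simp only [Bool.false_eq_true, if_false, List.singleton_append, List.zip_cons_cons,
      List.zip_nil_right, List.map_cons, List.map_nil, PySem.List.slice_natCast]
  | succ d ih =>
    intro k j res hk hj hkd
    have hklt : (k : Int) < (s.length : Int) := by exact_mod_cast by omega
    rw [PySem.List.pyRange_one_cons hklt]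
    have hcast : (k : Int) + 1 = ((k + 1 : Nat) : Int) := by push_cast; ring
    rw [hcast]
    simp only [List.foldl_cons, List.filter_cons]
    have hkn : k < s.length := by omega
    by_cases hC : |(PySem.List.pyGetD s (k : Int) (0, 0)).2 - (PySem.List.pyGetD s ((k : Int) - 1) (0, 0)).2| > m
    · simp only [hC, decide_true, if_true]
      have hget : PySem.List.pyGetD s (k : Int) (0, 0) = s.getD k (0, 0) := PySem.List.pyGetD_natCast s k (0, 0)
      have hsingle : [PySem.List.pyGetD s (k : Int) (0, 0)] = (s.drop k).take (k + 1 - k) := by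
        rw [hget]
        have h1 : k + 1 - k = 1 := by omega
        rw [h1, drop_take_one s k hkn]
      rw [hsingle]
      rw [ih (k + 1) k (res ++ [(s.drop j).take (k - j)]) (by omega) (by omega) (by omega)]
      simp only [List.cons_append, List.zip_cons_cons, List.map_cons, PySem.List.slice_natCast,
        List.append_assoc, List.nil_append]
    · simp only [hC, decide_false, if_false]
      have hget : PySem.List.pyGetD s (k : Int) (0, 0) = s.getD k (0, 0) := PySem.List.pyGetD_natCast s k (0, 0)
      have hpush : (s.drop j).take (k - j) ++ [PySem.List.pyGetD s (k : Int) (0, 0)]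
          = (s.drop j).take (k + 1 - j) := by
        rw [hget]; exact take_push s j k (by omega) hkn (0, 0)
      rw [hpush]
      exact ih (k + 1) j res (by omega) (by omega) (by omega)

theorem split_list_by_y_difference_main : ∀ (data : List (Int × Int)) (max_y_diff : Int),
    split_list_by_y_difference data max_y_diff = split_list_by_y_difference_alt data max_y_diff := by
  intro data m
  unfold split_list_by_y_difference split_list_by_y_difference_alt
  set s := PySem.List.sorted data (fun item => item.2) false with hs
  by_cases he : s.isEmpty
  · have hlen : s.length = 0 := by
      rw [List.isEmpty_iff] at he; rw [he]; rfl
    simp only [he, if_true, hlen, Nat.cast_zero]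
    rw [PySem.List.pyRange_one_eq_nil (by norm_num)]
    simp
  · have he' : s.isEmpty = false := by rwa [Bool.not_eq_true] at he
    have hne : s ≠ [] := List.isEmpty_eq_false_iff.mp he'
    have hlen : 1 ≤ s.length := List.length_pos_iff.mpr hne
    simp only [he', Bool.false_eq_true, if_false]
    have hcg0 : [PySem.List.pyGetD s 0 (0, 0)] = s.take 1 := by
      have h0 : PySem.List.pyGetD s 0 (0, 0) = s.getD 0 (0, 0) := by
        have := PySem.List.pyGetD_natCast s 0 ((0, 0) : Int × Int)
        simpa using this
      rw [h0]
      simpa using (drop_take_one s 0 (by omega) (0, 0)).symm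
    have hmain := inv_lemma s m (s.length - 1) 1 0 [] (by omega) (by omega) (by omega)
    simp only [Nat.cast_one, Nat.cast_zero, Nat.sub_zero, List.drop_zero, List.nil_append] at hmain
    rw [hcg0]
    show finishP _ = _
    rw [hmain, PySem.List.slice_from_one]
    rfl

-- ===== VERDICT (by name: the statement is the Claim_ definition above) =====
theorem split_list_by_y_difference_spec : Claim_equal_split_list_by_y_difference := by
  intro data m _
  exact split_list_by_y_difference_main data m
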